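-- pv_equiv track=rewrite | github.com/escaco95/vjass-plus | vjassp.py | replace_api_calls
-- ===== SOURCE A (Python) =====
-- def replace_api_calls(line):
--     # replace '.' with '_' outside of quoted strings
--     # but DO NOT replace decimal dot cases strictly bounded by non-identifier chars:
--     # - 0.00
--     # - .00
--     # - 00.
--     in_string = False
--     string_char = ''
--     result = []
--     i = 0
--
--     def is_ident_char(ch: str) -> bool:
--         return ch.isalnum() or ch == '_'
--
--     n = len(line)
--     while i < n:
--         c = line[i]
--         if in_string:
--             result.append(c)
--             if c == string_char:
--                 in_string = False
--             elif c == '\\':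
--                 i += 1
--                 if i < n:
--                     result.append(line[i])
--         else:
--             if c == '"' or c == "'":
--                 in_string = True
--                 string_char = c
--                 result.append(c)
--             elif c == '.':
--                 left_digit = (i > 0 and line[i - 1].isdigit())
--                 right_digit = (i + 1 < n and line[i + 1].isdigit())
--
--                 if left_digit or right_digit:
--                     #
--                     #
--                     l = i - 1
--                     while l >= 0 and line[l].isdigit():
--                         l -= 1
--                     left_boundary = line[l] if l >= 0 else None
--                     #
--                     r = i + 1
--                     while r < n and line[r].isdigit():
--                         r += 1
--                     right_boundary = line[r] if r < n else None
--
--                     preserve_decimal = True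
--                     #   ,
--                     if left_digit and left_boundary is not None and is_ident_char(left_boundary):
--                         preserve_decimal = False
--                     #   ,
--                     if right_digit and right_boundary is not None and is_ident_char(right_boundary):
--                         preserve_decimal = False
--
--                     if preserve_decimal:
--                         result.append('.')
--                     else:
--                         result.append('_')
--                 else:
--                     result.append('_')
--             else:
--                 result.append(c)
--         i += 1
--     return ''.join(result)
-- ===== SOURCE B (Python) =====
-- # B: segment-based rewrite — split the line into string-literal spans (copied
-- # verbatim) and plain spans (dots mapped by a global-index decimal rule).
-- def _is_ident(ch):
--     return ch.isalnum() or ch == '_'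
--
-- def _keep_dot(line, i):
--     n = len(line)
--     l = i
--     while l > 0 and line[l - 1].isdigit():
--         l -= 1
--     r = i + 1
--     while r < n and line[r].isdigit():
--         r += 1
--     if l == i and r == i + 1:
--         return False                      # no digit neighbour: plain api dot
--     if l < i and l > 0 and _is_ident(line[l - 1]):
--         return False                      # digit run touches an identifier
--     if r > i + 1 and r < n and _is_ident(line[r]):
--         return False
--     return True
--
-- def replace_api_calls(line):
--     n = len(line)
--     pieces = []
--     i = 0
--     while i < n:
--         c = line[i]
--         if c == '"' or c == "'":
--             j = i + 1                     # consume a whole string literal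
--             while j < n:
--                 if line[j] == c:
--                     j += 1
--                     break
--                 if line[j] == '\\':
--                     j += 2
--                 else:
--                     j += 1
--             pieces.append(line[i:j])
--             i = j
--         else:
--             j = i                         # consume a whole plain span
--             while j < n and line[j] != '"' and line[j] != "'":
--                 j += 1
--             seg = []
--             for k in range(i, j):
--                 ch = line[k]
--                 if ch == '.':
--                     seg.append('.' if _keep_dot(line, k) else '_')
--                 else:
--                     seg.append(ch)
--             pieces.append(''.join(seg))
--             i = j
--     return ''.join(pieces)
-- ===== Notes on version B (the rewrite author's own statement) =====
-- stated objective: alternative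
-- what changed: Replaces A's one-character-at-a-time state machine (in_string flag, escape bookkeeping per iteration) by a two-level segment scan: string literals are located and copied verbatim as whole slices, and each plain span is mapped with a factored-out _keep_dot decimal test on global indices.
import Mathlib
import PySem

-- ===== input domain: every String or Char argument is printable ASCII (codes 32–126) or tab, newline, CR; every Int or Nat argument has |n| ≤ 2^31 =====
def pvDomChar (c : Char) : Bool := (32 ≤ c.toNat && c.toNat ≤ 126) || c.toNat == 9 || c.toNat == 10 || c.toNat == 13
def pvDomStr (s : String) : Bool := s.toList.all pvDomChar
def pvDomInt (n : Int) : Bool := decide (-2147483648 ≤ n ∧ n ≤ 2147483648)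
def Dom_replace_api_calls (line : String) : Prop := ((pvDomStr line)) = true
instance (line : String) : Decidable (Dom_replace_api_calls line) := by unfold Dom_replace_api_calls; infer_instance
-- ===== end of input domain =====

-- B replaces A's one-character state machine by a two-level segment scan (string
-- literals copied verbatim as slices, plain spans mapped by a global decimal rule); objective: alternative.
-- While-loops are ported as structural recursions on an explicit step-count (fuel) that
-- bounds the remaining iterations exactly as the loop conditions do.

-- Python str.isdigit / (isalnum or '_') on the ASCII domain (exact there):
def pvIsDigit (c : Char) : Bool := '0' ≤ c && c ≤ '9'
def pvIsIdent (c : Char) : Bool :=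
  pvIsDigit c || ('a' ≤ c && c ≤ 'z') || ('A' ≤ c && c ≤ 'Z') || c == '_'

-- ===== PORT A =====
-- A's left digit-run scan: while l >= 0 and line[l].isdigit(): l -= 1
def aRunLeftF (cs : List Char) : Nat → Int → Int
  | 0, l => l
  | fuel + 1, l =>
    if 0 ≤ l ∧ pvIsDigit (cs.getD l.toNat ' ') then aRunLeftF cs fuel (l - 1) else l

def aRunLeft (cs : List Char) (l : Int) : Int := aRunLeftF cs (l + 1).toNat l

-- A's right digit-run scan: while r < n and line[r].isdigit(): r += 1
def aRunRightF (cs : List Char) (n : Nat) : Nat → Nat → Nat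
  | 0, r => r
  | fuel + 1, r =>
    if r < n ∧ pvIsDigit (cs.getD r ' ') then aRunRightF cs n fuel (r + 1) else r

def aRunRight (cs : List Char) (n r : Nat) : Nat := aRunRightF cs n (n - r) r

-- A's while loop; state = (i, in_string, string_char); result list built head-first
-- (string_char starts unset in Python; it is never read before being set).
def aLoopF (cs : List Char) (n : Nat) : Nat → Nat → Bool → Char → List Char
  | 0, _, _, _ => []
  | fuel + 1, i, instr, sc =>
    if i < n then
      let c := cs.getD i ' '
      match instr with
      | true =>
        if c == sc then c :: aLoopF cs n fuel (i + 1) false sc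
        else if c == '\\' then
          if i + 1 < n then c :: cs.getD (i + 1) ' ' :: aLoopF cs n fuel (i + 2) true sc
          else c :: aLoopF cs n fuel (i + 2) true sc
        else c :: aLoopF cs n fuel (i + 1) true sc
      | false =>
        if c == '"' || c == '\'' then c :: aLoopF cs n fuel (i + 1) true c
        else if c == '.' then
          let left_digit := decide (0 < i) && pvIsDigit (cs.getD (i - 1) ' ')
          let right_digit := decide (i + 1 < n) && pvIsDigit (cs.getD (i + 1) ' ')
          (if left_digit || right_digit then
            let l := aRunLeft cs ((i : Int) - 1)
            let r := aRunRight cs n (i + 1)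
            let p1 := left_digit && decide (0 ≤ l) && pvIsIdent (cs.getD l.toNat ' ')
            let p2 := right_digit && decide (r < n) && pvIsIdent (cs.getD r ' ')
            (if p1 || p2 then '_' else '.')
          else '_') :: aLoopF cs n fuel (i + 1) false sc
        else c :: aLoopF cs n fuel (i + 1) false sc
    else []

def aLoop (cs : List Char) (n i : Nat) (instr : Bool) (sc : Char) : List Char :=
  aLoopF cs n (n - i) i instr sc

def replace_api_calls (line : String) : String :=
  String.ofList (aLoop line.toList line.toList.length 0 false ' ')

-- ===== PORT B =====
-- B's _keep_dot scans: while l > 0 and line[l-1].isdigit(): l -= 1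
def bRunLeft (cs : List Char) : Nat → Nat
  | 0 => 0
  | l + 1 => if pvIsDigit (cs.getD l ' ') then bRunLeft cs l else l + 1

-- while r < n and line[r].isdigit(): r += 1
def bRunRightF (cs : List Char) (n : Nat) : Nat → Nat → Nat
  | 0, r => r
  | fuel + 1, r =>
    if r < n ∧ pvIsDigit (cs.getD r ' ') then bRunRightF cs n fuel (r + 1) else r

def bRunRight (cs : List Char) (n r : Nat) : Nat := bRunRightF cs n (n - r) r

def bKeepDot (cs : List Char) (n i : Nat) : Bool :=
  let l := bRunLeft cs i
  let r := bRunRight cs n (i + 1)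
  if l = i ∧ r = i + 1 then false
  else if l < i ∧ 0 < l ∧ pvIsIdent (cs.getD (l - 1) ' ') then false
  else if i + 1 < r ∧ r < n ∧ pvIsIdent (cs.getD r ' ') then false
  else true

-- B's inner consumer of a string literal starting after the quote
def bScanStrF (cs : List Char) (n : Nat) (q : Char) : Nat → Nat → Nat
  | 0, j => j
  | fuel + 1, j =>
    if j < n then
      if cs.getD j ' ' == q then j + 1
      else if cs.getD j ' ' == '\\' then bScanStrF cs n q fuel (j + 2)
      else bScanStrF cs n q fuel (j + 1)
    else j

def bScanStr (cs : List Char) (n j : Nat) (q : Char) : Nat := bScanStrF cs n q (n - j) j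

-- B's inner consumer of a plain (non-string) span
def bScanPlainF (cs : List Char) (n : Nat) : Nat → Nat → Nat
  | 0, j => j
  | fuel + 1, j =>
    if j < n ∧ cs.getD j ' ' ≠ '"' ∧ cs.getD j ' ' ≠ '\'' then bScanPlainF cs n fuel (j + 1)
    else j

def bScanPlain (cs : List Char) (n j : Nat) : Nat := bScanPlainF cs n (n - j) j

-- B's per-character mapping of a plain span [i, j)
def bMapSegF (cs : List Char) (n : Nat) : Nat → Nat → Nat → List Char
  | 0, _, _ => []
  | fuel + 1, i, j =>
    if i < j then
      (let ch := cs.getD i ' '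
       if ch == '.' then (if bKeepDot cs n i then '.' else '_') else ch)
        :: bMapSegF cs n fuel (i + 1) j
    else []

def bMapSeg (cs : List Char) (n i j : Nat) : List Char := bMapSegF cs n (j - i) i j

-- B's outer loop over segments
def bLoopF (cs : List Char) (n : Nat) : Nat → Nat → List Char
  | 0, _ => []
  | fuel + 1, i =>
    if i < n then
      let c := cs.getD i ' '
      if c = '"' ∨ c = '\'' then
        (cs.drop i).take (bScanStr cs n (i + 1) c - i) ++ bLoopF cs n fuel (bScanStr cs n (i + 1) c)
      else
        bMapSeg cs n i (bScanPlain cs n i) ++ bLoopF cs n fuel (bScanPlain cs n i)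
    else []

def bLoop (cs : List Char) (n i : Nat) : List Char := bLoopF cs n (n - i) i

def replace_api_calls_alt (line : String) : String :=
  String.ofList (bLoop line.toList line.toList.length 0)

-- ===== PRECONDITION & SPEC =====
def Spec_replace_api_calls (line : String) (out : String) : Prop := out = replace_api_calls_alt line
instance (line : String) (out : String) : Decidable (Spec_replace_api_calls line out) := by unfold Spec_replace_api_calls; infer_instance

-- ===== CLAIM (what is proved, stated in full; the proofs are below) =====
def Claim_equal_replace_api_calls : Prop := ∀ (line : String), Dom_replace_api_calls line → Spec_replace_api_calls line (replace_api_calls line)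

-- ===== LEMMAS AND PROOFS =====

theorem aRunLeft_eq (cs : List Char) (l : Int) :
    aRunLeft cs l =
      if 0 ≤ l ∧ pvIsDigit (cs.getD l.toNat ' ') then aRunLeft cs (l - 1) else l := by
  unfold aRunLeft
  by_cases h : 0 ≤ l ∧ pvIsDigit (cs.getD l.toNat ' ') = true
  · rw [show (l + 1).toNat = (l - 1 + 1).toNat + 1 from by omega]
    simp only [aRunLeftF]
  · rw [if_neg h]
    cases hn : (l + 1).toNat with
    | zero => simp only [aRunLeftF]
    | succ f => simp only [aRunLeftF]; rw [if_neg h]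

theorem aRunRight_eq (cs : List Char) (n r : Nat) :
    aRunRight cs n r =
      if r < n ∧ pvIsDigit (cs.getD r ' ') then aRunRight cs n (r + 1) else r := by
  unfold aRunRight
  by_cases h : r < n ∧ pvIsDigit (cs.getD r ' ') = true
  · rw [show n - r = (n - (r + 1)) + 1 from by omega]
    simp only [aRunRightF]
  · rw [if_neg h]
    cases hn : n - r with
    | zero => simp only [aRunRightF]
    | succ f => simp only [aRunRightF]; rw [if_neg h]

theorem runRight_rel (cs : List Char) (n : Nat) :
    ∀ (f r : Nat), aRunRightF cs n f r = bRunRightF cs n f r := by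
  intro f
  induction f with
  | zero => intro r; rfl
  | succ f ih =>
    intro r
    simp only [aRunRightF, bRunRightF]
    split
    · exact ih (r + 1)
    · rfl

theorem runRight_rel' (cs : List Char) (n r : Nat) : aRunRight cs n r = bRunRight cs n r :=
  runRight_rel cs n (n - r) r

theorem bRunLeft_le (cs : List Char) : ∀ l : Nat, bRunLeft cs l ≤ l := by
  intro l
  induction l with
  | zero => simp [bRunLeft]
  | succ l ih => simp only [bRunLeft]; split <;> omega

theorem bRunRightF_ge (cs : List Char) (n : Nat) : ∀ (f r : Nat), r ≤ bRunRightF cs n f r := by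
  intro f
  induction f with
  | zero => intro r; exact Nat.le_refl r
  | succ f ih =>
    intro r
    simp only [bRunRightF]
    split
    · have := ih (r + 1); omega
    · exact Nat.le_refl r

theorem bRunRight_ge (cs : List Char) (n r : Nat) : r ≤ bRunRight cs n r :=
  bRunRightF_ge cs n (n - r) r

theorem bRunRight_eq (cs : List Char) (n r : Nat) :
    bRunRight cs n r =
      if r < n ∧ pvIsDigit (cs.getD r ' ') then bRunRight cs n (r + 1) else r := by
  rw [← runRight_rel', ← runRight_rel', aRunRight_eq]

theorem bRunLeft_lt_iff (cs : List Char) (i : Nat) :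
    bRunLeft cs i < i ↔ (0 < i ∧ pvIsDigit (cs.getD (i - 1) ' ') = true) := by
  cases i with
  | zero => simp [bRunLeft]
  | succ l =>
    have hle := bRunLeft_le cs l
    simp only [bRunLeft, Nat.add_sub_cancel]
    by_cases hd : pvIsDigit (cs.getD l ' ') = true
    · rw [if_pos hd]
      constructor
      · intro _; exact ⟨Nat.succ_pos l, hd⟩
      · intro _; omega
    · rw [if_neg hd]
      constructor
      · intro h; omega
      · intro h; exact absurd h.2 hd

theorem bRunRight_gt_iff (cs : List Char) (n i : Nat) :
    i + 1 < bRunRight cs n (i + 1) ↔ (i + 1 < n ∧ pvIsDigit (cs.getD (i + 1) ' ') = true) := by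
  constructor
  · intro h
    by_contra hc
    rw [bRunRight_eq, if_neg hc] at h
    omega
  · intro h
    rw [bRunRight_eq, if_pos h]
    have := bRunRight_ge cs n (i + 1 + 1)
    omega

-- A's Int left scan and B's Nat left scan compute the same boundary (shifted by one)
theorem runLeft_rel (cs : List Char) : ∀ k : Nat,
    aRunLeft cs ((k : Int) - 1) = (bRunLeft cs k : Int) - 1 := by
  intro k
  induction k with
  | zero =>
    rw [aRunLeft_eq, if_neg]
    · simp [bRunLeft]
    · intro ⟨h1, _⟩; omega
  | succ k ih =>
    rw [aRunLeft_eq]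
    have ht : (((k + 1 : Nat) : Int) - 1).toNat = k := by omega
    simp only [bRunLeft, ht]
    by_cases hd : pvIsDigit (cs.getD k ' ') = true
    · rw [if_pos ⟨by omega, hd⟩, if_pos hd]
      have he : ((k + 1 : Nat) : Int) - 1 - 1 = (k : Int) - 1 := by omega
      rw [he]
      exact ih
    · rw [if_neg, if_neg hd]
      intro ⟨_, h2⟩
      exact hd h2

theorem dot_abstract (n i l r : Nat) (dL dR iL iR : Bool)
    (hl : l ≤ i) (hr : i + 1 ≤ r)
    (hli : l < i ↔ (0 < i ∧ dL = true)) (hri : i + 1 < r ↔ (i + 1 < n ∧ dR = true)) :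
    (if (decide (0 < i) && dL || decide (i + 1 < n) && dR) = true then
       (if (decide (0 < i) && dL && decide (0 < l) && iL ||
            decide (i + 1 < n) && dR && decide (r < n) && iR) = true then '_' else '.')
     else '_')
    = (if (if l = i ∧ r = i + 1 then false
           else if l < i ∧ 0 < l ∧ iL = true then false
           else if i + 1 < r ∧ r < n ∧ iR = true then false
           else true) = true then '.' else '_') := by
  rcases Bool.eq_false_or_eq_true dL with hdL | hdL <;>
    rcases Bool.eq_false_or_eq_true dR with hdR | hdR <;>
      rcases Bool.eq_false_or_eq_true iL with hiL | hiL <;>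
        rcases Bool.eq_false_or_eq_true iR with hiR | hiR <;>
          subst hdL hdR hiL hiR <;>
          simp only [Bool.true_and, Bool.false_and, Bool.and_true, Bool.and_false,
            Bool.or_false, Bool.false_or, Bool.true_or, Bool.or_true, Bool.and_eq_true,
            Bool.or_eq_true, decide_eq_true_eq, and_true, and_false, true_and, false_and,
            or_false, false_or, iff_true, iff_false, if_true, if_false,
            Bool.false_eq_true, Bool.true_eq_false] at hli hri ⊢ <;>
          split_ifs <;> first | rfl | omega | simp_all

-- the character A emits for a '.' equals B's mapping
theorem dot_char_eq (cs : List Char) (n i : Nat) :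
    (if (decide (0 < i) && pvIsDigit (cs.getD (i - 1) ' ') ||
         decide (i + 1 < n) && pvIsDigit (cs.getD (i + 1) ' ')) = true then
       (if (decide (0 < i) && pvIsDigit (cs.getD (i - 1) ' ') &&
              decide (0 ≤ aRunLeft cs ((i : Int) - 1)) &&
              pvIsIdent (cs.getD (aRunLeft cs ((i : Int) - 1)).toNat ' ') ||
            decide (i + 1 < n) && pvIsDigit (cs.getD (i + 1) ' ') &&
              decide (aRunRight cs n (i + 1) < n) &&
              pvIsIdent (cs.getD (aRunRight cs n (i + 1)) ' ')) = true
        then '_' else '.')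
     else '_') = (if bKeepDot cs n i then '.' else '_') := by
  have htn : ∀ l : Nat, ((l : Int) - 1).toNat = l - 1 := fun l => by omega
  have h0 : ∀ l : Nat, (0 ≤ (l : Int) - 1) ↔ 0 < l := fun l => by omega
  simp only [runLeft_rel, runRight_rel', bKeepDot, htn, h0]
  exact dot_abstract n i (bRunLeft cs i) (bRunRight cs n (i + 1))
    (pvIsDigit (cs.getD (i - 1) ' ')) (pvIsDigit (cs.getD (i + 1) ' '))
    (pvIsIdent (cs.getD (bRunLeft cs i - 1) ' ')) (pvIsIdent (cs.getD (bRunRight cs n (i + 1)) ' '))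
    (bRunLeft_le cs i) (bRunRight_ge cs n (i + 1))
    (bRunLeft_lt_iff cs i) (bRunRight_gt_iff cs n i)

-- one-step unfolding equations for the fuelled loops --------------------------

theorem bScanStrF_ge (cs : List Char) (n : Nat) (q : Char) :
    ∀ (f j : Nat), j ≤ bScanStrF cs n q f j := by
  intro f
  induction f with
  | zero => intro j; exact Nat.le_refl j
  | succ f ih =>
    intro j
    have h1 := ih (j + 1)
    have h2 := ih (j + 2)
    simp only [bScanStrF]
    split_ifs <;> omega

theorem bScanStr_ge (cs : List Char) (n j : Nat) (q : Char) : j ≤ bScanStr cs n j q :=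
  bScanStrF_ge cs n q (n - j) j

theorem bScanStrF_inv (cs : List Char) (n : Nat) (q : Char) :
    ∀ (f1 f2 j : Nat), n - j ≤ f1 → n - j ≤ f2 →
      bScanStrF cs n q f1 j = bScanStrF cs n q f2 j := by
  intro f1
  induction f1 with
  | zero =>
    intro f2 j h1 h2
    have hj : ¬ j < n := by omega
    cases f2 <;> simp [bScanStrF, hj]
  | succ f ih =>
    intro f2 j h1 h2
    cases f2 with
    | zero =>
      have hj : ¬ j < n := by omega
      simp [bScanStrF, hj]
    | succ f2 =>
      simp only [bScanStrF]
      by_cases hj : j < n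
      · rw [if_pos hj, if_pos hj]
        split_ifs
        · rfl
        · exact ih f2 (j + 2) (by omega) (by omega)
        · exact ih f2 (j + 1) (by omega) (by omega)
      · rw [if_neg hj, if_neg hj]

theorem bScanStr_eq (cs : List Char) (n j : Nat) (q : Char) :
    bScanStr cs n j q =
      if j < n then
        if cs.getD j ' ' == q then j + 1
        else if cs.getD j ' ' == '\\' then bScanStr cs n (j + 2) q
        else bScanStr cs n (j + 1) q
      else j := by
  unfold bScanStr
  by_cases hj : j < n
  · rw [show n - j = (n - j - 1) + 1 from by omega]
    simp only [bScanStrF]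
    rw [if_pos hj, if_pos hj]
    have e1 : bScanStrF cs n q (n - j - 1) (j + 1) = bScanStrF cs n q (n - (j + 1)) (j + 1) :=
      bScanStrF_inv cs n q _ _ _ (by omega) (by omega)
    have e2 : bScanStrF cs n q (n - j - 1) (j + 2) = bScanStrF cs n q (n - (j + 2)) (j + 2) :=
      bScanStrF_inv cs n q _ _ _ (by omega) (by omega)
    rw [e1, e2]
  · rw [if_neg hj]
    cases hn : n - j with
    | zero => simp only [bScanStrF]
    | succ f => simp only [bScanStrF]; rw [if_neg hj]

theorem bScanPlain_eq (cs : List Char) (n j : Nat) :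
    bScanPlain cs n j =
      if j < n ∧ cs.getD j ' ' ≠ '"' ∧ cs.getD j ' ' ≠ '\'' then bScanPlain cs n (j + 1)
      else j := by
  unfold bScanPlain
  by_cases h : j < n ∧ cs.getD j ' ' ≠ '"' ∧ cs.getD j ' ' ≠ '\''
  · rw [show n - j = (n - (j + 1)) + 1 from by omega]
    simp only [bScanPlainF]
  · rw [if_neg h]
    cases hn : n - j with
    | zero => simp only [bScanPlainF]
    | succ f => simp only [bScanPlainF]; rw [if_neg h]

theorem bScanPlainF_ge (cs : List Char) (n : Nat) : ∀ (f j : Nat), j ≤ bScanPlainF cs n f j := by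
  intro f
  induction f with
  | zero => intro j; exact Nat.le_refl j
  | succ f ih =>
    intro j
    have := ih (j + 1)
    simp only [bScanPlainF]
    split <;> omega

theorem bScanPlain_ge (cs : List Char) (n j : Nat) : j ≤ bScanPlain cs n j :=
  bScanPlainF_ge cs n (n - j) j

theorem bScanPlain_gt (cs : List Char) (n j : Nat) (h : j < n)
    (h1 : cs.getD j ' ' ≠ '"') (h2 : cs.getD j ' ' ≠ '\'') : j < bScanPlain cs n j := by
  have := bScanPlain_ge cs n (j + 1)
  rw [bScanPlain_eq, if_pos ⟨h, h1, h2⟩]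
  omega

theorem bMapSeg_eq (cs : List Char) (n i j : Nat) :
    bMapSeg cs n i j =
      if i < j then
        (let ch := cs.getD i ' '
         if ch == '.' then (if bKeepDot cs n i then '.' else '_') else ch)
          :: bMapSeg cs n (i + 1) j
      else [] := by
  unfold bMapSeg
  by_cases h : i < j
  · rw [show j - i = (j - (i + 1)) + 1 from by omega]
    simp only [bMapSegF]
  · rw [if_neg h]
    cases hn : j - i with
    | zero => simp only [bMapSegF]
    | succ f => simp only [bMapSegF]; rw [if_neg h]

theorem bLoopF_inv (cs : List Char) (n : Nat) :
    ∀ (f1 f2 i : Nat), n - i ≤ f1 → n - i ≤ f2 → bLoopF cs n f1 i = bLoopF cs n f2 i := by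
  intro f1
  induction f1 with
  | zero =>
    intro f2 i h1 h2
    have hi : ¬ i < n := by omega
    cases f2 <;> simp [bLoopF, hi]
  | succ f ih =>
    intro f2 i h1 h2
    cases f2 with
    | zero =>
      have hi : ¬ i < n := by omega
      simp [bLoopF, hi]
    | succ f2 =>
      simp only [bLoopF]
      by_cases hi : i < n
      · rw [if_pos hi, if_pos hi]
        by_cases hq : cs.getD i ' ' = '"' ∨ cs.getD i ' ' = '\''
        · rw [if_pos hq, if_pos hq]
          have hge := bScanStr_ge cs n (i + 1) (cs.getD i ' ')
          exact congrArg _ (ih f2 _ (by omega) (by omega))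
        · rw [if_neg hq, if_neg hq]
          have hgt : i < bScanPlain cs n i :=
            bScanPlain_gt cs n i hi (fun hh => hq (Or.inl hh)) (fun hh => hq (Or.inr hh))
          exact congrArg _ (ih f2 _ (by omega) (by omega))
      · rw [if_neg hi, if_neg hi]

theorem bLoop_eq (cs : List Char) (n i : Nat) :
    bLoop cs n i =
      if i < n then
        if cs.getD i ' ' = '"' ∨ cs.getD i ' ' = '\'' then
          (cs.drop i).take (bScanStr cs n (i + 1) (cs.getD i ' ') - i) ++
            bLoop cs n (bScanStr cs n (i + 1) (cs.getD i ' '))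
        else bMapSeg cs n i (bScanPlain cs n i) ++ bLoop cs n (bScanPlain cs n i)
      else [] := by
  unfold bLoop
  by_cases hi : i < n
  · rw [show n - i = (n - i - 1) + 1 from by omega]
    simp only [bLoopF]
    rw [if_pos hi, if_pos hi]
    by_cases hq : cs.getD i ' ' = '"' ∨ cs.getD i ' ' = '\''
    · rw [if_pos hq, if_pos hq]
      have hge := bScanStr_ge cs n (i + 1) (cs.getD i ' ')
      exact congrArg _ (bLoopF_inv cs n _ _ _ (by omega) (by omega))
    · rw [if_neg hq, if_neg hq]
      have hgt : i < bScanPlain cs n i :=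
        bScanPlain_gt cs n i hi (fun hh => hq (Or.inl hh)) (fun hh => hq (Or.inr hh))
      exact congrArg _ (bLoopF_inv cs n _ _ _ (by omega) (by omega))
  · rw [if_neg hi]
    cases hn : n - i with
    | zero => simp only [bLoopF]
    | succ f => simp only [bLoopF]; rw [if_neg hi]

theorem aLoopF_inv (cs : List Char) (n : Nat) :
    ∀ (f1 f2 i : Nat) (instr : Bool) (sc : Char), n - i ≤ f1 → n - i ≤ f2 →
      aLoopF cs n f1 i instr sc = aLoopF cs n f2 i instr sc := by
  intro f1
  induction f1 with
  | zero =>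
    intro f2 i instr sc h1 h2
    have hi : ¬ i < n := by omega
    cases f2 <;> simp [aLoopF, hi]
  | succ f ih =>
    intro f2 i instr sc h1 h2
    cases f2 with
    | zero =>
      have hi : ¬ i < n := by omega
      simp [aLoopF, hi]
    | succ f2 =>
      simp only [aLoopF]
      by_cases hi : i < n
      · rw [if_pos hi, if_pos hi]
        cases instr <;> split_ifs <;>
          simp only [List.cons.injEq, true_and] <;>
          exact ih f2 _ _ _ (by omega) (by omega)
      · rw [if_neg hi, if_neg hi]

theorem aLoop_eq_str (cs : List Char) (n j : Nat) (sc : Char) :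
    aLoop cs n j true sc =
      if j < n then
        if cs.getD j ' ' == sc then cs.getD j ' ' :: aLoop cs n (j + 1) false sc
        else if cs.getD j ' ' == '\\' then
          if j + 1 < n then
            cs.getD j ' ' :: cs.getD (j + 1) ' ' :: aLoop cs n (j + 2) true sc
          else cs.getD j ' ' :: aLoop cs n (j + 2) true sc
        else cs.getD j ' ' :: aLoop cs n (j + 1) true sc
      else [] := by
  unfold aLoop
  by_cases hj : j < n
  · rw [show n - j = (n - j - 1) + 1 from by omega]
    simp only [aLoopF]
    rw [if_pos hj, if_pos hj]
    have e1 : ∀ (b : Bool) (s : Char),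
        aLoopF cs n (n - j - 1) (j + 1) b s = aLoopF cs n (n - (j + 1)) (j + 1) b s :=
      fun b s => aLoopF_inv cs n _ _ _ b s (by omega) (by omega)
    have e2 : ∀ (b : Bool) (s : Char),
        aLoopF cs n (n - j - 1) (j + 2) b s = aLoopF cs n (n - (j + 2)) (j + 2) b s :=
      fun b s => aLoopF_inv cs n _ _ _ b s (by omega) (by omega)
    simp only [e1, e2]
  · rw [if_neg hj]
    cases hn : n - j with
    | zero => simp only [aLoopF]
    | succ f => simp only [aLoopF]; rw [if_neg hj]

theorem aLoop_eq_out (cs : List Char) (n i : Nat) (sc : Char) :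
    aLoop cs n i false sc =
      if i < n then
        if cs.getD i ' ' == '"' || cs.getD i ' ' == '\'' then
          cs.getD i ' ' :: aLoop cs n (i + 1) true (cs.getD i ' ')
        else if cs.getD i ' ' == '.' then
          (if (decide (0 < i) && pvIsDigit (cs.getD (i - 1) ' ') ||
               decide (i + 1 < n) && pvIsDigit (cs.getD (i + 1) ' ')) = true then
             (if (decide (0 < i) && pvIsDigit (cs.getD (i - 1) ' ') &&
                    decide (0 ≤ aRunLeft cs ((i : Int) - 1)) &&
                    pvIsIdent (cs.getD (aRunLeft cs ((i : Int) - 1)).toNat ' ') ||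
                  decide (i + 1 < n) && pvIsDigit (cs.getD (i + 1) ' ') &&
                    decide (aRunRight cs n (i + 1) < n) &&
                    pvIsIdent (cs.getD (aRunRight cs n (i + 1)) ' ')) = true
              then '_' else '.')
           else '_') :: aLoop cs n (i + 1) false sc
        else cs.getD i ' ' :: aLoop cs n (i + 1) false sc
      else [] := by
  unfold aLoop
  by_cases hi : i < n
  · rw [show n - i = (n - i - 1) + 1 from by omega]
    simp only [aLoopF]
    rw [if_pos hi, if_pos hi]
    have e1 : ∀ (b : Bool) (s : Char),
        aLoopF cs n (n - i - 1) (i + 1) b s = aLoopF cs n (n - (i + 1)) (i + 1) b s :=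
      fun b s => aLoopF_inv cs n _ _ _ b s (by omega) (by omega)
    simp only [e1]
  · rw [if_neg hi]
    cases hn : n - i with
    | zero => simp only [aLoopF]
    | succ f => simp only [aLoopF]; rw [if_neg hi]

-- slicing off the head of a span
theorem take_drop_cons (cs : List Char) (j j' : Nat) (hj : j < cs.length) (hlt : j < j') :
    (cs.drop j).take (j' - j) = cs.getD j ' ' :: (cs.drop (j + 1)).take (j' - (j + 1)) := by
  rw [List.drop_eq_getElem_cons hj]
  have : j' - j = (j' - (j + 1)) + 1 := by omega
  rw [this, List.take_succ_cons, List.getD_eq_getElem cs ' ' hj]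

-- A's in-string phase consumes exactly the literal span B slices off
theorem aLoop_string (cs : List Char) (n : Nat) (hn : n = cs.length) :
    ∀ (f j : Nat) (sc : Char), n - j ≤ f →
      aLoop cs n j true sc =
        (cs.drop j).take (bScanStr cs n j sc - j) ++ aLoop cs n (bScanStr cs n j sc) false sc := by
  intro f
  induction f with
  | zero =>
    intro j sc h
    have hj : ¬ j < n := by omega
    have hs : bScanStr cs n j sc = j := by rw [bScanStr_eq, if_neg hj]
    rw [aLoop_eq_str, if_neg hj, hs, aLoop_eq_out, if_neg hj]
    simp
  | succ f ih =>
    intro j sc h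
    by_cases hj : j < n
    · rw [aLoop_eq_str, if_pos hj, bScanStr_eq, if_pos hj]
      by_cases hq : (cs.getD j ' ' == sc) = true
      · rw [if_pos hq, if_pos hq]
        rw [take_drop_cons cs j (j + 1) (by omega) (by omega)]
        simp
      · rw [if_neg hq, if_neg hq]
        by_cases hb : (cs.getD j ' ' == '\\') = true
        · rw [if_pos hb, if_pos hb]
          have hge := bScanStr_ge cs n (j + 2) sc
          by_cases h2 : j + 1 < n
          · rw [if_pos h2]
            rw [take_drop_cons cs j _ (by omega) (by omega),
                take_drop_cons cs (j + 1) _ (by omega) (by omega),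
                ih (j + 2) sc (by omega)]
            simp
          · rw [if_neg h2]
            have hsc : bScanStr cs n (j + 2) sc = j + 2 := by
              rw [bScanStr_eq, if_neg (by omega)]
            have hnl2 : aLoop cs n (j + 2) true sc = [] := by
              rw [aLoop_eq_str, if_neg (by omega)]
            have hnl : aLoop cs n (j + 2) false sc = [] := by
              rw [aLoop_eq_out, if_neg (by omega)]
            have hd : cs.drop (j + 1) = [] := List.drop_eq_nil_of_le (by omega)
            rw [hnl2, hsc, hnl, take_drop_cons cs j (j + 2) (by omega) (by omega), hd]
            simp
        · rw [if_neg hb, if_neg hb]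
          have hge := bScanStr_ge cs n (j + 1) sc
          rw [take_drop_cons cs j _ (by omega) (by omega), ih (j + 1) sc (by omega)]
          simp
    · have hs : bScanStr cs n j sc = j := by rw [bScanStr_eq, if_neg hj]
      rw [aLoop_eq_str, if_neg hj, hs, aLoop_eq_out, if_neg hj]
      simp

-- B's plain-span phase advances one character at a time
theorem bLoop_step (cs : List Char) (n i : Nat) (hi : i < n)
    (h1 : cs.getD i ' ' ≠ '"') (h2 : cs.getD i ' ' ≠ '\'') :
    bLoop cs n i =
      (let ch := cs.getD i ' '
       if ch == '.' then (if bKeepDot cs n i then '.' else '_') else ch) :: bLoop cs n (i + 1) := by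
  have hq : ¬ (cs.getD i ' ' = '"' ∨ cs.getD i ' ' = '\'') := by
    intro h; rcases h with h | h
    · exact h1 h
    · exact h2 h
  have hsp : bScanPlain cs n i = bScanPlain cs n (i + 1) := by
    rw [bScanPlain_eq, if_pos ⟨hi, h1, h2⟩]
  have hgt := bScanPlain_gt cs n i hi h1 h2
  conv_lhs => rw [bLoop_eq]
  rw [if_pos hi, if_neg hq, bMapSeg_eq, if_pos hgt]
  simp only [List.cons_append, List.cons.injEq, true_and]
  rw [hsp]
  by_cases hin : i + 1 < n
  · by_cases hq2 : cs.getD (i + 1) ' ' = '"' ∨ cs.getD (i + 1) ' ' = '\''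
    · have hsp2 : bScanPlain cs n (i + 1) = i + 1 := by
        rw [bScanPlain_eq, if_neg]
        intro ⟨_, ha, hb⟩
        rcases hq2 with h | h
        · exact ha h
        · exact hb h
      rw [hsp2, bMapSeg_eq, if_neg (by omega)]
      simp
    · conv_rhs => rw [bLoop_eq]
      rw [if_pos hin, if_neg hq2]
  · have hsp2 : bScanPlain cs n (i + 1) = i + 1 := by
      rw [bScanPlain_eq, if_neg (by omega)]
    have hb2 : bLoop cs n (i + 1) = [] := by rw [bLoop_eq, if_neg hin]
    rw [hsp2, hb2, bMapSeg_eq, if_neg (by omega)]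
    simp

-- main equivalence, by fuel induction matching A's one-character steps
theorem aLoop_eq_bLoop (cs : List Char) (n : Nat) (hn : n = cs.length) :
    ∀ (k i : Nat) (sc : Char), n - i ≤ k → aLoop cs n i false sc = bLoop cs n i := by
  intro k
  induction k with
  | zero =>
    intro i sc h
    rw [aLoop_eq_out, if_neg (by omega), bLoop_eq, if_neg (by omega)]
  | succ k ih =>
    intro i sc h
    by_cases hi : i < n
    · by_cases hq : cs.getD i ' ' = '"' ∨ cs.getD i ' ' = '\''
      · have hqb : (cs.getD i ' ' == '"' || cs.getD i ' ' == '\'') = true := by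
          rcases hq with h | h <;> rw [h] <;> rfl
        rw [aLoop_eq_out, if_pos hi, if_pos hqb, bLoop_eq, if_pos hi, if_pos hq]
        have hge := bScanStr_ge cs n (i + 1) (cs.getD i ' ')
        rw [aLoop_string cs n hn (n - (i + 1)) (i + 1) (cs.getD i ' ') (by omega),
            ih (bScanStr cs n (i + 1) (cs.getD i ' ')) (cs.getD i ' ') (by omega),
            take_drop_cons cs i _ (by omega) (by omega)]
        simp
      · have h1 : cs.getD i ' ' ≠ '"' := fun hh => hq (Or.inl hh)
        have h2 : cs.getD i ' ' ≠ '\'' := fun hh => hq (Or.inr hh)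
        rw [bLoop_step cs n i hi h1 h2]
        have hqb : (cs.getD i ' ' == '"' || cs.getD i ' ' == '\'') = false := by
          simp only [Bool.or_eq_false_iff, beq_eq_false_iff_ne, ne_eq]
          exact ⟨h1, h2⟩
        rw [aLoop_eq_out, if_pos hi, if_neg (by rw [hqb]; exact Bool.false_ne_true)]
        by_cases hd : cs.getD i ' ' = '.'
        · simp only [hd]
          rw [if_pos (show (('.' : Char) == '.') = true from rfl),
              if_pos (show (('.' : Char) == '.') = true from rfl)]
          rw [dot_char_eq cs n i]
          exact congrArg _ (ih (i + 1) sc (by omega))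
        · have hdb : (cs.getD i ' ' == '.') = false := by
            simp only [beq_eq_false_iff_ne, ne_eq]; exact hd
          rw [if_neg (by rw [hdb]; exact Bool.false_ne_true),
              if_neg (by rw [hdb]; exact Bool.false_ne_true)]
          exact congrArg _ (ih (i + 1) sc (by omega))
    · rw [aLoop_eq_out, if_neg hi, bLoop_eq, if_neg hi]

-- ===== VERDICT (by name: the statement is the Claim_ definition above) =====
theorem replace_api_calls_spec : Claim_equal_replace_api_calls := by
  intro line _
  unfold Spec_replace_api_calls replace_api_calls replace_api_calls_alt
  rw [aLoop_eq_bLoop line.toList line.toList.length rfl (line.toList.length - 0) 0 ' ' (by omega)]
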